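-- pv_equiv track=rewrite | github.com/TheNitromeFan/baekjoon | 16508.py | minimum_cut
-- ===== SOURCE A (Python) =====
-- import itertools
-- import string
--
-- def minimum_cut(word, books, n):
--     ret = 10 ** 100
--     found = False
--     for i in range(n + 1):
--         for comb in itertools.combinations(books, i):
--             pay, letters = 0, ""
--             for price, title in comb:
--                 pay += price
--                 letters += title
--             if all(letters.count(x) >= word.count(x) for x in string.ascii_uppercase) and ret > pay:
--                 ret = pay
--                 found = True
--     if not found:
--         return -1
--     return ret
-- ===== SOURCE B (Python) =====
-- import string
--
-- def minimum_cut(word, books, n):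
--     # recursive take/skip search over the books with a size budget,
--     # using 26-entry letter-count vectors instead of string concatenation
--     need = [word.count(c) for c in string.ascii_uppercase]
--
--     def rec(bs, k, cost, have):
--         if k < 0:
--             return None
--         if not bs:
--             return cost if all(h >= d for h, d in zip(have, need)) else None
--         (price, title) = bs[0]
--         rest = bs[1:]
--         skip = rec(rest, k, cost, have)
--         add = [h + title.count(c) for h, c in zip(have, string.ascii_uppercase)]
--         take = rec(rest, k - 1, cost + price, add)
--         if skip is None:
--             return take
--         if take is None:
--             return skip
--         return min(skip, take)
--
--     res = rec(books, n, 0, [0] * 26)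
--     return -1 if res is None else res
-- ===== Notes on version B (the rewrite author's own statement) =====
-- stated objective: alternative
-- what changed: Replaces the size-by-size itertools.combinations enumeration with per-subset string concatenation and substring counting by a recursive take/skip search over the books carrying a running cost and a 26-entry letter-count vector, checked pointwise against the word's precomputed need vector at the leaves.
import Mathlib
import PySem

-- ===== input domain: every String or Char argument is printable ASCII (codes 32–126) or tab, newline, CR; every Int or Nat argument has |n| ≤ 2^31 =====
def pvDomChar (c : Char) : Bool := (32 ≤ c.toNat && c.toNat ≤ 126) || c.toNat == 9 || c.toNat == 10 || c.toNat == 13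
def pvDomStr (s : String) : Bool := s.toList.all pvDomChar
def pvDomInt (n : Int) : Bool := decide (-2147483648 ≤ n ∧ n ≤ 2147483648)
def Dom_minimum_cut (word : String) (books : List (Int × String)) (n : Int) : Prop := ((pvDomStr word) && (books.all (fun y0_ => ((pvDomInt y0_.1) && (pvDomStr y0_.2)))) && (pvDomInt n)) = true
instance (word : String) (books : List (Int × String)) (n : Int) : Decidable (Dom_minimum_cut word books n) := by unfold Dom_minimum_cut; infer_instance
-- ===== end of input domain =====

-- B replaces the combinations enumeration with a recursive take/skip search over the
-- books carrying a cost and a 26-entry letter-count vector (objective: alternative).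

-- ===== PORT A =====
-- string.ascii_uppercase
def pvUpper : List Char := "ABCDEFGHIJKLMNOPQRSTUVWXYZ".toList

-- itertools.combinations(bs, k), in itertools' order
def pvComb : Nat → List (Int × String) → List (List (Int × String))
  | 0, _ => [[]]
  | _ + 1, [] => []
  | k + 1, x :: xs => (pvComb k xs).map (x :: ·) ++ pvComb (k + 1) xs

-- the body of A's inner 'for comb in …' loop, acting on the state (ret, found)
def pvStepA (word : String) (st : Int × Bool) (comb : List (Int × String)) : Int × Bool :=
  let pl := comb.foldl (fun (pl : Int × String) b => (pl.1 + b.1, pl.2 ++ b.2)) (0, "")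
  if (pvUpper.all fun c =>
        PySem.Str.count word (String.singleton c) ≤ PySem.Str.count pl.2 (String.singleton c))
      && decide (pl.1 < st.1)
  then (pl.1, true) else st

def minimum_cut (word : String) (books : List (Int × String)) (n : Int) : Int :=
  let st := (PySem.List.pyRange 0 (n + 1) 1).foldl
    -- i comes from range(n+1), so i ≥ 0 always; the i < 0 guard only totalizes toNat
    (fun st i => ((if i < 0 then [] else pvComb i.toNat books).foldl (pvStepA word) st))
    ((10 : Int) ^ 100, false)
  if st.2 then st.1 else -1

-- ===== PORT B =====
-- add = [h + title.count(c) for h, c in zip(have, string.ascii_uppercase)]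
def pvAddVec (hv : List Int) (title : String) : List Int :=
  (hv.zip pvUpper).map (fun hc => hc.1 + (PySem.Str.count title (String.singleton hc.2) : Int))

-- all(h >= d for h, d in zip(have, need))
def pvCoverVec (hv need : List Int) : Bool := (hv.zip need).all fun hd => hd.2 ≤ hd.1

-- rec(bs, k, cost, have)
def pvRec (need : List Int) : List (Int × String) → Int → Int → List Int → Option Int
  | bs, k, cost, hv =>
    if k < 0 then none else
    match bs with
    | [] => if pvCoverVec hv need then some cost else none
    | (p, t) :: rest =>
      let skip := pvRec need rest k cost hv
      let take := pvRec need rest (k - 1) (cost + p) (pvAddVec hv t)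
      match skip, take with
      | none, _ => take
      | some s, none => some s
      | some s, some u => some (min s u)

def minimum_cut_alt (word : String) (books : List (Int × String)) (n : Int) : Int :=
  let need := pvUpper.map (fun c => (PySem.Str.count word (String.singleton c) : Int))
  match pvRec need books n 0 (List.replicate 26 (0 : Int)) with
  | none => -1
  | some m => m

-- ===== PRECONDITION & SPEC =====
-- Pre_ excludes book lists whose total positive price reaches A's 10^100 sentinel: there A's
-- found/ret bookkeeping can miss covering subsets and its -1 is an artefact of the sentinel.
def Pre_minimum_cut (word : String) (books : List (Int × String)) (n : Int) : Prop :=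
  (books.map (fun b => max b.1 0)).sum < 10 ^ 100

instance (word : String) (books : List (Int × String)) (n : Int) : Decidable (Pre_minimum_cut word books n) := by unfold Pre_minimum_cut; infer_instance

def pvWitness_minimum_cut : String × (List (Int × String)) × Int := ("AB", [(3, "AB"), (1, "A")], 2)

def Spec_minimum_cut (word : String) (books : List (Int × String)) (n : Int) (out : Int) : Prop := out = minimum_cut_alt word books n
instance (word : String) (books : List (Int × String)) (n : Int) (out : Int) : Decidable (Spec_minimum_cut word books n out) := by unfold Spec_minimum_cut; infer_instance

-- ===== CLAIM (what is proved, stated in full; the proofs are below) =====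
def Claim_equal_minimum_cut : Prop := ∀ (word : String) (books : List (Int × String)) (n : Int), Dom_minimum_cut word books n → Pre_minimum_cut word books n → Spec_minimum_cut word books n (minimum_cut word books n)

-- ===== LEMMAS AND PROOFS =====

-- count of a single character: PySem.Chars.count cs [c] is List.count
theorem pvCount_go_singleton (c : Char) (fuel : Nat) (cs : List Char) (acc : Nat)
    (h : cs.length ≤ fuel) : PySem.Chars.count.go [c] fuel cs acc = acc + cs.count c := by
  induction fuel generalizing cs acc with
  | zero =>
    have : cs = [] := List.length_eq_zero_iff.mp (Nat.le_zero.mp h)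
    subst this; simp [PySem.Chars.count.go]
  | succ fuel ih =>
    cases cs with
    | nil => simp [PySem.Chars.count.go]
    | cons x t =>
      have ht : t.length ≤ fuel := by simpa using Nat.succ_le_succ_iff.mp h
      by_cases hx : c = x
      · subst hx
        simp [PySem.Chars.count.go, List.isPrefixOf, ih t (acc + 1) ht]
        omega
      · simp [PySem.Chars.count.go, List.isPrefixOf, beq_iff_eq, hx, ih t acc ht, Ne.symm hx]

theorem pvCharsCount_singleton (cs : List Char) (c : Char) :
    PySem.Chars.count cs [c] = cs.count c := by
  unfold PySem.Chars.count
  rw [if_neg (by simp)]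
  simpa using pvCount_go_singleton c cs.length cs 0 le_rfl

theorem pvZipSelf {α : Type} (l : List α) : l.zip l = l.map (fun x => (x, x)) := by
  induction l with
  | nil => rfl
  | cons x t ih => simp [ih]

theorem pvCount_singleton (s : String) (c : Char) :
    PySem.Str.count s (String.singleton c) = s.toList.count c := by
  rw [PySem.Str.count_eq]
  simp only [String.toList_singleton]
  exact pvCharsCount_singleton _ _

-- ---- generic option-min machinery ----
def pvOMin : Option Int → Option Int → Option Int
  | none, b => b
  | some a, none => some a
  | some a, some b => some (min a b)

def pvMinList (L : List Int) : Option Int := L.foldl (fun acc x => pvOMin acc (some x)) none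

theorem pvOMin_assoc (a b c : Option Int) : pvOMin (pvOMin a b) c = pvOMin a (pvOMin b c) := by
  cases a <;> cases b <;> cases c <;> simp [pvOMin, min_assoc]

theorem pvFoldl_omin (L : List Int) (a : Option Int) :
    L.foldl (fun acc x => pvOMin acc (some x)) a = pvOMin a (pvMinList L) := by
  induction L generalizing a with
  | nil => cases a <;> rfl
  | cons x t ih =>
    show t.foldl _ (pvOMin a (some x)) = _
    rw [ih, show pvMinList (x :: t) = t.foldl (fun acc y => pvOMin acc (some y)) (pvOMin none (some x)) from rfl,
        ih (pvOMin none (some x)), pvOMin_assoc]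
    rfl

theorem pvMinList_append (L1 L2 : List Int) :
    pvMinList (L1 ++ L2) = pvOMin (pvMinList L1) (pvMinList L2) := by
  simp only [pvMinList, List.foldl_append]
  exact pvFoldl_omin L2 _

theorem pvMinList_eq_min? (L : List Int) : pvMinList L = L.min? := by
  cases L with
  | nil => rfl
  | cons x t =>
    simp only [List.min?_cons']
    show t.foldl (fun acc y => pvOMin acc (some y)) (some x) = _
    induction t generalizing x with
    | nil => rfl
    | cons y s ih => simp only [List.foldl_cons, pvOMin]; exact ih (min x y)

theorem pvMinList_congr (L1 L2 : List Int) (h : ∀ x, x ∈ L1 ↔ x ∈ L2) :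
    pvMinList L1 = pvMinList L2 := by
  rw [pvMinList_eq_min?, pvMinList_eq_min?]
  cases h1 : L1.min? with
  | none =>
    rw [List.min?_eq_none_iff] at h1
    subst h1
    cases h2 : L2.min? with
    | none => rfl
    | some m =>
      have := (List.min?_eq_some_iff (xs := L2)).mp h2
      exact absurd ((h m).mpr this.1) (by simp)
  | some m =>
    have hm := (List.min?_eq_some_iff (xs := L1)).mp h1
    symm
    rw [List.min?_eq_some_iff]
    exact ⟨(h m).mp hm.1, fun b hb => hm.2 b ((h b).mpr hb)⟩

-- ---- proof-side descriptions of the two programs ----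
def pvPay (S : List (Int × String)) : Int := (S.map (·.1)).sum

def pvLetters (S : List (Int × String)) : String := S.foldl (fun acc b => acc ++ b.2) ""

def pvCoverA (word : String) (S : List (Int × String)) : Bool :=
  pvUpper.all fun c =>
    PySem.Str.count word (String.singleton c) ≤ PySem.Str.count (pvLetters S) (String.singleton c)

def pvVecOf (hv : List Int) (S : List (Int × String)) : List Int :=
  S.foldl (fun v b => pvAddVec v b.2) hv

def pvCand (need : List Int) : List (Int × String) → Int → Int → List Int → List Int
  | bs, k, cost, hv =>
    if k < 0 then [] else
    match bs with
    | [] => if pvCoverVec hv need then [cost] else []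
    | (p, t) :: rest => pvCand need rest k cost hv ++ pvCand need rest (k - 1) (cost + p) (pvAddVec hv t)

theorem pvRec_eq_minList (need : List Int) (bs : List (Int × String)) (k cost : Int) (hv : List Int) :
    pvRec need bs k cost hv = pvMinList (pvCand need bs k cost hv) := by
  induction bs generalizing k cost hv with
  | nil =>
    rw [pvRec, pvCand]
    split_ifs <;> rfl
  | cons b rest ih =>
    obtain ⟨p, t⟩ := b
    rw [pvRec, pvCand]
    split_ifs with hk
    · rfl
    · rw [pvMinList_append, ← ih, ← ih]
      cases pvRec need rest k cost hv <;> cases pvRec need rest (k - 1) (cost + p) (pvAddVec hv t) <;>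
        simp [pvOMin]

theorem pvCand_mem (need : List Int) (bs : List (Int × String)) (k cost : Int) (hv : List Int) (x : Int) :
    x ∈ pvCand need bs k cost hv ↔
      ∃ S, S.Sublist bs ∧ (S.length : Int) ≤ k ∧ pvCoverVec (pvVecOf hv S) need = true ∧
        x = cost + pvPay S := by
  induction bs generalizing k cost hv with
  | nil =>
    rw [pvCand]
    constructor
    · intro hx
      split_ifs at hx with hk hc
      · simp at hx
      · simp only [List.mem_singleton] at hx
        exact ⟨[], List.Sublist.refl _, by simp; omega, by simpa [pvVecOf] using hc,
          by simp [pvPay, hx]⟩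
      · simp at hx
    · rintro ⟨S, hS, hlen, hc, hx⟩
      have hSnil : S = [] := List.sublist_nil.mp hS
      subst hSnil
      simp only [pvPay, List.map_nil, List.sum_nil, add_zero] at hx
      have hk : ¬ k < 0 := by simp at hlen; omega
      simp only [pvVecOf, List.foldl_nil] at hc
      simp [hk, hc, hx]
  | cons b rest ih =>
    obtain ⟨p, t⟩ := b
    rw [pvCand]
    split_ifs with hk
    · simp only [List.not_mem_nil, false_iff]
      rintro ⟨S, hS, hlen, -, -⟩
      have : (0 : Int) ≤ S.length := Int.natCast_nonneg _
      omega
    · simp only [List.mem_append, ih]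
      constructor
      · rintro (⟨S, hS, hlen, hc, hx⟩ | ⟨S, hS, hlen, hc, hx⟩)
        · exact ⟨S, hS.cons _, hlen, hc, hx⟩
        · refine ⟨(p, t) :: S, hS.cons₂ _, ?_, ?_, ?_⟩
          · simp only [List.length_cons]; push_cast; omega
          · simpa [pvVecOf] using hc
          · simp only [pvPay, List.map_cons, List.sum_cons] at hx ⊢; omega
      · rintro ⟨S, hS, hlen, hc, hx⟩
        rcases List.sublist_cons_iff.mp hS with hS2 | ⟨S2, rfl, hS2⟩
        · exact Or.inl ⟨S, hS2, hlen, hc, hx⟩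
        · refine Or.inr ⟨S2, hS2, ?_, ?_, ?_⟩
          · simp only [List.length_cons] at hlen; push_cast at hlen ⊢; omega
          · simpa [pvVecOf] using hc
          · simp only [pvPay, List.map_cons, List.sum_cons] at hx ⊢; omega

-- ---- bridging the two coverage tests ----
theorem pvLetters_count (S : List (Int × String)) (c : Char) (acc : String) :
    (S.foldl (fun acc b => acc ++ b.2) acc).toList.count c
      = acc.toList.count c + (S.map (fun b => b.2.toList.count c)).sum := by
  induction S generalizing acc with
  | nil => simp
  | cons b rest ih =>
    simp only [List.foldl_cons, List.map_cons, List.sum_cons, ih, String.toList_append,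
      List.count_append]
    omega

theorem pvVecOf_map (f : Char → Int) (S : List (Int × String)) :
    pvVecOf (pvUpper.map f) S
      = pvUpper.map (fun c => f c + (S.map (fun b => (b.2.toList.count c : Int))).sum) := by
  induction S generalizing f with
  | nil => simp [pvVecOf]
  | cons b rest ih =>
    show pvVecOf (pvAddVec (pvUpper.map f) b.2) rest = _
    rw [show pvAddVec (pvUpper.map f) b.2
          = pvUpper.map (fun c => f c + (b.2.toList.count c : Int)) by
        simp [pvAddVec, List.zip_map_left, pvZipSelf, List.map_map, Function.comp_def,
          PySem.Str.count_eq, String.toList_singleton, pvCharsCount_singleton]]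
    rw [ih]
    simp [add_assoc]

theorem pvCoverVec_map (f g : Char → Int) :
    pvCoverVec (pvUpper.map f) (pvUpper.map g) = pvUpper.all fun c => decide (g c ≤ f c) := by
  simp [pvCoverVec, List.zip_map', List.all_map, Function.comp_def]

theorem pvCastSum (S : List (Int × String)) (g : (Int × String) → Nat) :
    (S.map (fun b => (g b : Int))).sum = ((S.map g).sum : Int) := by
  induction S with
  | nil => simp
  | cons b rest ih => simp [ih]

theorem pvCover_bridge (word : String) (S : List (Int × String)) :
    pvCoverVec (pvVecOf (List.replicate 26 (0 : Int)) S)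
        (pvUpper.map (fun c => (PySem.Str.count word (String.singleton c) : Int)))
      = pvCoverA word S := by
  have hrep : (List.replicate 26 (0 : Int)) = pvUpper.map (fun _ => (0 : Int)) := by decide
  rw [hrep, pvVecOf_map, pvCoverVec_map, pvCoverA]
  refine List.all_congr rfl (fun c => ?_)
  simp only [decide_eq_decide, pvCount_singleton, zero_add]
  rw [pvLetters, pvLetters_count S c ""]
  rw [pvCastSum S (fun b => List.count c b.2.toList), Nat.cast_le]
  simp

-- ---- A's side ----
theorem pvLetters_acc (S : List (Int × String)) (acc : String) :
    S.foldl (fun a b => a ++ b.2) acc = acc ++ pvLetters S := by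
  induction S generalizing acc with
  | nil => simp [pvLetters]
  | cons b rest ih =>
    show rest.foldl _ (acc ++ b.2) = _
    rw [ih, show pvLetters (b :: rest) = rest.foldl (fun a x => a ++ x.2) ("" ++ b.2) from rfl,
      ih ("" ++ b.2), String.append_assoc]
    simp

theorem pvStepA_eq (word : String) (st : Int × Bool) (S : List (Int × String)) :
    pvStepA word st S
      = if pvCoverA word S && decide (pvPay S < st.1) then (pvPay S, true) else st := by
  have hfold : S.foldl (fun (pl : Int × String) b => (pl.1 + b.1, pl.2 ++ b.2)) (0, "")
      = (pvPay S, pvLetters S) := by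
    have : ∀ (a : Int) (s : String),
        S.foldl (fun (pl : Int × String) b => (pl.1 + b.1, pl.2 ++ b.2)) (a, s)
          = (a + pvPay S, s ++ pvLetters S) := by
      induction S with
      | nil => intro a s; simp [pvPay, pvLetters]
      | cons b rest ih =>
        intro a s
        show rest.foldl _ (a + b.1, s ++ b.2) = _
        rw [ih]
        refine Prod.ext ?_ ?_
        · simp [pvPay]; ring
        · show s ++ b.2 ++ pvLetters rest = s ++ pvLetters (b :: rest)
          rw [show pvLetters (b :: rest) = rest.foldl (fun a x => a ++ x.2) ("" ++ b.2) from rfl,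
            pvLetters_acc, String.append_assoc]
          simp
    simpa using this 0 ""
  simp only [pvStepA, hfold, pvCoverA]
  rfl

theorem pvFoldA (word : String) (C : List (List (Int × String))) (st : Int × Bool)
    (hst : st.2 = false → st.1 = 10 ^ 100)
    (hsmall : ∀ S ∈ C, pvCoverA word S = true → pvPay S < 10 ^ 100) :
    C.foldl (pvStepA word) st
      = (((C.filter (pvCoverA word)).map pvPay).foldl min st.1,
         st.2 || !((C.filter (pvCoverA word)).map pvPay).isEmpty) := by
  induction C generalizing st with
  | nil => simp
  | cons S rest ih =>
    simp only [List.foldl_cons, pvStepA_eq]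
    by_cases hc : pvCoverA word S = true
    · by_cases hlt : pvPay S < st.1
      · rw [if_pos (by simp [hc, hlt])]
        rw [ih (pvPay S, true) (by simp) (fun T hT => hsmall T (List.mem_cons_of_mem _ hT))]
        simp only [List.filter_cons, hc, if_pos, List.map_cons, List.foldl_cons]
        rw [min_eq_right (le_of_lt hlt)]
        simp
      · have hst2 : st.2 = true := by
          by_contra h
          have h1 := hst (by simpa using h)
          have := hsmall S (List.mem_cons_self) hc
          omega
        rw [if_neg (by simp [hlt])]
        rw [ih st hst (fun T hT => hsmall T (List.mem_cons_of_mem _ hT))]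
        simp only [List.filter_cons, hc, if_pos, List.map_cons, List.foldl_cons]
        rw [min_eq_left (by omega)]
        simp [hst2]
    · rw [if_neg (by simp [hc])]
      rw [ih st hst (fun T hT => hsmall T (List.mem_cons_of_mem _ hT))]
      simp only [List.filter_cons]
      rw [if_neg (by simpa using hc)]

theorem pvComb_mem (k : Nat) (bs : List (Int × String)) (S : List (Int × String)) :
    S ∈ pvComb k bs ↔ S.Sublist bs ∧ S.length = k := by
  induction bs generalizing k S with
  | nil =>
    cases k with
    | zero =>
      simp only [pvComb, List.mem_singleton]
      constructor
      · rintro rfl; exact ⟨List.Sublist.refl _, rfl⟩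
      · rintro ⟨h, -⟩; exact List.sublist_nil.mp h
    | succ k =>
      simp only [pvComb, List.not_mem_nil, false_iff]
      rintro ⟨h, hlen⟩
      rw [List.sublist_nil.mp h] at hlen
      simp at hlen
  | cons b rest ih =>
    cases k with
    | zero =>
      simp only [pvComb, List.mem_singleton]
      constructor
      · rintro rfl; exact ⟨List.nil_sublist _, rfl⟩
      · rintro ⟨-, hlen⟩; exact List.length_eq_zero_iff.mp hlen
    | succ k =>
      simp only [pvComb, List.mem_append, List.mem_map, ih]
      constructor
      · rintro (⟨S2, ⟨hS2, hlen⟩, rfl⟩ | ⟨hS, hlen⟩)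
        · exact ⟨hS2.cons₂ _, by simp [hlen]⟩
        · exact ⟨hS.cons _, hlen⟩
      · rintro ⟨hS, hlen⟩
        rcases List.sublist_cons_iff.mp hS with hS2 | ⟨S2, rfl, hS2⟩
        · exact Or.inr ⟨hS2, hlen⟩
        · exact Or.inl ⟨S2, ⟨hS2, by simpa using hlen⟩, rfl⟩

theorem pvFlat_mem (books : List (Int × String)) (n : Int) (S : List (Int × String)) :
    S ∈ (PySem.List.pyRange 0 (n + 1) 1).flatMap
          (fun i => if i < 0 then [] else pvComb i.toNat books)
      ↔ S.Sublist books ∧ (S.length : Int) ≤ n := by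
  simp only [List.mem_flatMap, PySem.List.mem_pyRange_one]
  constructor
  · rintro ⟨i, ⟨h0, hn⟩, hS⟩
    rw [if_neg (by omega)] at hS
    obtain ⟨hsub, hlen⟩ := (pvComb_mem _ _ _).mp hS
    exact ⟨hsub, by omega⟩
  · rintro ⟨hsub, hlen⟩
    refine ⟨(S.length : Int), ⟨Int.natCast_nonneg _, by omega⟩, ?_⟩
    rw [if_neg (by omega)]
    exact (pvComb_mem _ _ _).mpr ⟨hsub, by simp⟩

theorem pvPay_le (S books : List (Int × String)) (h : S.Sublist books) :
    pvPay S ≤ (books.map (fun b => max b.1 0)).sum := by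
  calc pvPay S ≤ (S.map (fun b => max b.1 0)).sum :=
        List.sum_le_sum (fun b _ => le_max_left _ _)
    _ ≤ (books.map (fun b => max b.1 0)).sum :=
        List.Sublist.sum_le_sum (h.map _) (by
          intro a ha
          obtain ⟨b, -, rfl⟩ := List.mem_map.mp ha
          exact le_max_right _ _)

-- ===== VERDICT (by name: the statement is the Claim_ definition above) =====
theorem minimum_cut_spec : Claim_equal_minimum_cut := by
  unfold Claim_equal_minimum_cut
  intro word books n hdom hpre
  unfold Spec_minimum_cut
  set flat := (PySem.List.pyRange 0 (n + 1) 1).flatMap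
      (fun i => if i < 0 then [] else pvComb i.toNat books) with hflat
  set pays := ((flat.filter (pvCoverA word)).map pvPay) with hpays
  have hsmall : ∀ S ∈ flat, pvCoverA word S = true → pvPay S < 10 ^ 100 := by
    intro S hS _
    have hsub := ((pvFlat_mem books n S).mp hS).1
    exact lt_of_le_of_lt (pvPay_le S books hsub) hpre
  have hpaysmall : ∀ x ∈ pays, x < 10 ^ 100 := by
    intro x hx
    obtain ⟨S, hS, rfl⟩ := List.mem_map.mp hx
    obtain ⟨hSf, hScov⟩ := List.mem_filter.mp hS
    exact hsmall S hSf hScov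
  have hmem : ∀ x, x ∈ pvCand (pvUpper.map fun c => (PySem.Str.count word (String.singleton c) : Int))
      books n 0 (List.replicate 26 (0 : Int)) ↔ x ∈ pays := by
    intro x
    rw [pvCand_mem]
    constructor
    · rintro ⟨S, hsub, hlen, hcov, rfl⟩
      rw [pvCover_bridge] at hcov
      refine List.mem_map.mpr ⟨S, List.mem_filter.mpr ⟨(pvFlat_mem books n S).mpr ⟨hsub, hlen⟩, hcov⟩, by omega⟩
    · intro hx
      obtain ⟨S, hS, rfl⟩ := List.mem_map.mp hx
      obtain ⟨hSf, hScov⟩ := List.mem_filter.mp hS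
      obtain ⟨hsub, hlen⟩ := (pvFlat_mem books n S).mp hSf
      exact ⟨S, hsub, hlen, by rw [pvCover_bridge]; exact hScov, by omega⟩
  have hA : minimum_cut word books n
      = if (!pays.isEmpty) = true then pays.foldl min ((10 : Int) ^ 100) else -1 := by
    unfold minimum_cut
    rw [← List.foldl_flatMap, ← hflat,
      pvFoldA word flat ((10 : Int) ^ 100, false) (fun _ => rfl) hsmall, ← hpays]
    by_cases h : pays.isEmpty <;> simp [h]
  have hB : minimum_cut_alt word books n
      = (match pvMinList pays with | none => -1 | some m => m) := by
    show (match pvRec (pvUpper.map fun c => (PySem.Str.count word (String.singleton c) : Int))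
        books n 0 (List.replicate 26 (0 : Int)) with | none => -1 | some m => m) = _
    rw [pvRec_eq_minList, pvMinList_congr _ pays hmem]
  rw [hA, hB]
  cases hp : pays with
  | nil => simp [pvMinList]
  | cons x xs =>
    have hxB : x < 10 ^ 100 := hpaysmall x (by rw [hp]; exact List.mem_cons_self)
    rw [pvMinList_eq_min?, List.min?_cons']
    simp only [List.isEmpty_cons, Bool.not_false, if_pos]
    rw [List.foldl_cons, min_eq_right (le_of_lt hxB)]
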